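-- pv_equiv track=rewrite | github.com/dzhao14/HackerRank_code | competitions/101_Hack_47/modular_game_of_numbers.py | solution
-- ===== SOURCE A (Python) =====
-- def solution(n, p, q):
--     sums = [0 for _ in range(n)]
--     counts = [0 for _ in range(n+1)]
--     for i in p:
--         for j in q:
--             sums[(i+j)%n] += 1
--     minimum = min(sums)
--     ans = []
--     for i in range(n):
--         if sums[i] == minimum:
--             for j in range(1, n+1):
--                 if (j + i) % n == 0:
--                     ans.append(j)
--     return min(ans)
-- ===== SOURCE B (Python) =====
-- def solution(n, p, q):
--     # residue frequency tables, then cyclic convolution, then last argmin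
--     cp = [0] * n
--     for x in p:
--         cp[x % n] += 1
--     cq = [0] * n
--     for x in q:
--         cq[x % n] += 1
--     sums = [sum(cp[a] * cq[(r - a) % n] for a in range(n)) for r in range(n)]
--     best = 0
--     for r in range(1, n):
--         if sums[r] <= sums[best]:
--             best = r
--     return n - best
-- ===== Notes on version B (the rewrite author's own statement) =====
-- stated objective: alternative
-- what changed: Instead of A's double loop over all |p|*|q| pairs and a quadratic nested scan for the answer, B builds residue frequency tables for p and q in one pass each, forms the residue histogram as a cyclic convolution of the two count vectors, and picks the answer directly as n minus the last argmin in a single pass (O(|p|+|q|) instead of O(|p|*|q|) pair counting; the shared O(n^2) convolution/scan phase keeps overall measured time comparable).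
import Mathlib
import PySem

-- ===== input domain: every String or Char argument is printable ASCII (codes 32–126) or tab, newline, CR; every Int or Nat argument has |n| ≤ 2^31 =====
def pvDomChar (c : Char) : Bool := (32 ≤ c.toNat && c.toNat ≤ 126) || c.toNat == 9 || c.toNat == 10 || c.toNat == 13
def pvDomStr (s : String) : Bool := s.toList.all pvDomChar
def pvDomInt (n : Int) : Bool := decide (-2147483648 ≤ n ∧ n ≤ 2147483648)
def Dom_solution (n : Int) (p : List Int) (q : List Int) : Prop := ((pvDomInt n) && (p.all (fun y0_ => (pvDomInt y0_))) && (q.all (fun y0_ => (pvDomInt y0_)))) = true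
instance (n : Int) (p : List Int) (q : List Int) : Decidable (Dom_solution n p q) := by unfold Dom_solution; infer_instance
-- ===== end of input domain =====

-- B replaces A's double loop over all |p|*|q| pairs by residue frequency tables
-- and a cyclic convolution of the two count vectors, and replaces A's nested
-- answer scan by a single last-argmin pass (objective: alternative).

-- ===== PORT A =====
def solution (n : Int) (p : List Int) (q : List Int) : Int :=
  let sums : List Int := (PySem.List.pyRange 0 n).map (fun _ => 0)
  let _counts : List Int := (PySem.List.pyRange 0 (n+1)).map (fun _ => 0)
  let sums := p.foldl (fun s i => q.foldl (fun s j =>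
      PySem.List.pySetD s (PySem.Int.mod (i+j) n)
        (PySem.List.pyGetD s (PySem.Int.mod (i+j) n) 0 + 1)) s) sums
  -- min(sums): raises on an empty list; Pre_ (n ≥ 1) rules that out
  let minimum := (PySem.List.min? sums (fun x => x)).getD 0
  let ans : List Int := (PySem.List.pyRange 0 n).foldl (fun acc i =>
      if PySem.List.pyGetD sums i 0 == minimum then
        (PySem.List.pyRange 1 (n+1)).foldl (fun acc2 j =>
          if PySem.Int.mod (j+i) n == 0 then acc2 ++ [j] else acc2) acc
      else acc) []
  (PySem.List.min? ans (fun x => x)).getD 0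

-- ===== PORT B =====
def solution_alt (n : Int) (p : List Int) (q : List Int) : Int :=
  let cp := p.foldl (fun s x =>
      PySem.List.pySetD s (PySem.Int.mod x n)
        (PySem.List.pyGetD s (PySem.Int.mod x n) 0 + 1)) (PySem.List.pyRepeat [(0:Int)] n)
  let cq := q.foldl (fun s x =>
      PySem.List.pySetD s (PySem.Int.mod x n)
        (PySem.List.pyGetD s (PySem.Int.mod x n) 0 + 1)) (PySem.List.pyRepeat [(0:Int)] n)
  let sums : List Int := (PySem.List.pyRange 0 n).map (fun r =>
      ((PySem.List.pyRange 0 n).map (fun a =>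
        PySem.List.pyGetD cp a 0 * PySem.List.pyGetD cq (PySem.Int.mod (r - a) n) 0)).sum)
  let best := (PySem.List.pyRange 1 n).foldl (fun b r =>
      if PySem.List.pyGetD sums r 0 ≤ PySem.List.pyGetD sums b 0 then r else b) 0
  n - best

-- ===== PRECONDITION & SPEC =====
-- Pre_ excludes exactly n ≤ 0, where A raises (min() of the empty list, or an
-- index error on the empty sums list).
def Pre_solution (n : Int) (p : List Int) (q : List Int) : Prop := 1 ≤ n
instance (n : Int) (p : List Int) (q : List Int) : Decidable (Pre_solution n p q) := by unfold Pre_solution; infer_instance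
def pvWitness_solution : Int × List Int × List Int := (3, [1, 5, -2], [0, 4])

def Spec_solution (n : Int) (p : List Int) (q : List Int) (out : Int) : Prop := out = solution_alt n p q
instance (n : Int) (p : List Int) (q : List Int) (out : Int) : Decidable (Spec_solution n p q out) := by unfold Spec_solution; infer_instance

-- ===== CLAIM (what is proved, stated in full; the proofs are below) =====
def Claim_equal_solution : Prop := ∀ (n : Int) (p : List Int) (q : List Int), Dom_solution n p q → Pre_solution n p q → Spec_solution n p q (solution n p q)


-- ===== LEMMAS AND PROOFS =====

-- count of elements of l whose Python residue mod n is a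
def cnt (n : Int) (l : List Int) (a : Nat) : Int :=
  (l.countP (fun x => (PySem.Int.mod x n).toNat == a) : Int)

lemma getD_set_eq (s : List Int) (m k : Nat) (v : Int) (hm : m < s.length) :
    (s.set m v).getD k 0 = if m = k then v else s.getD k 0 := by
  by_cases h : m = k
  · subst h; simp [List.getD_eq_getElem?_getD, hm]
  · simp [List.getD_eq_getElem?_getD, h]

lemma length_foldl_bump {α : Type} (l : List α) (g : α → Nat) (s : List Int) :
    (l.foldl (fun s x => s.set (g x) (s.getD (g x) 0 + 1)) s).length = s.length := by
  induction l generalizing s with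
  | nil => rfl
  | cons x l ih => rw [List.foldl_cons, ih]; simp

lemma getD_foldl_bump {α : Type} (l : List α) (g : α → Nat) (s : List Int) (k : Nat)
    (hg : ∀ x ∈ l, g x < s.length) (hk : k < s.length) :
    (l.foldl (fun s x => s.set (g x) (s.getD (g x) 0 + 1)) s).getD k 0
      = s.getD k 0 + (l.countP (fun x => g x == k) : Int) := by
  induction l generalizing s with
  | nil => simp
  | cons x l ih =>
    have hx : g x < s.length := hg x (List.mem_cons_self)
    rw [List.foldl_cons, ih _ (fun y hy => by simpa using hg y (List.mem_cons_of_mem _ hy)) (by simpa),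
        getD_set_eq s _ _ _ hx, List.countP_cons]
    by_cases h : g x = k
    · simp [h]; ring
    · simp [h]

lemma getD_foldl2_bump (P Q : List Int) (g : Int → Int → Nat) (s : List Int) (k : Nat)
    (hg : ∀ i j, g i j < s.length) (hk : k < s.length) :
    (P.foldl (fun s i => Q.foldl (fun s j => s.set (g i j) (s.getD (g i j) 0 + 1)) s) s).getD k 0
      = s.getD k 0 + (P.map (fun i => (Q.countP (fun j => g i j == k) : Int))).sum := by
  induction P generalizing s with
  | nil => simp
  | cons x P ih =>
    rw [List.foldl_cons, ih _ (fun i j => by rw [length_foldl_bump]; exact hg i j)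
          (by rw [length_foldl_bump]; exact hk),
        getD_foldl_bump Q (g x) s k (fun j _ => hg x j) hk]
    simp; ring

lemma shift_iff (n : Int) (_hn : 0 < n) (k i j : Int) (hk0 : 0 ≤ k) (hkn : k < n) :
    (i + j) % n = k ↔ j % n = (k - i) % n := by
  constructor
  · intro h
    have hm : Int.ModEq n (i + j) k := by
      unfold Int.ModEq; rw [h, Int.emod_eq_of_lt hk0 hkn]
    have := hm.sub_right i
    simpa using this
  · intro h
    have hm : Int.ModEq n j (k - i) := h
    have := hm.add_left i
    have h2 : (i + j) % n = (i + (k - i)) % n := this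
    rw [h2]; rw [show i + (k - i) = k by ring, Int.emod_eq_of_lt hk0 hkn]

lemma sum_ite_eq_range (m k : Nat) (hk : k < m) (F : Nat → Int) :
    ((List.range m).map (fun a => if k == a then F a else 0)).sum = F k := by
  induction m with
  | zero => omega
  | succ m ih =>
    rw [List.range_succ, List.map_append, List.sum_append]
    by_cases h : k = m
    · subst h
      have h0 : ((List.range k).map (fun a => if k == a then F a else 0)).sum = 0 := by
        apply List.sum_eq_zero
        intro y hy
        simp only [List.mem_map, List.mem_range] at hy
        obtain ⟨a, ha, rfl⟩ := hy
        simp [Nat.ne_of_gt ha]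
      rw [h0]; simp
    · have hk' : k < m := by omega
      rw [ih hk']
      simp [h]

lemma class_sum (g : Int → Nat) (m : Nat) (hg : ∀ x, g x < m) (l : List Int) (F : Nat → Int) :
    (l.map (fun x => F (g x))).sum
      = ((List.range m).map (fun a => (l.countP (fun x => g x == a) : Int) * F a)).sum := by
  induction l with
  | nil => simp
  | cons x l ih =>
    rw [List.map_cons, List.sum_cons, ih]
    have hcongr : ∀ a ∈ List.range m,
        (List.countP (fun y => g y == a) (x :: l) : Int) * F a
          = (List.countP (fun y => g y == a) l : Int) * F a + (if g x == a then F a else 0) := by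
      intro a _
      rw [List.countP_cons]
      by_cases h : g x = a
      · simp [h]; ring
      · simp [h]
    rw [List.map_congr_left hcongr,
        PySem.List.sum_map_add_int (List.range m)
          (fun a => (List.countP (fun y => g y == a) l : Int) * F a)
          (fun a => if g x == a then F a else 0),
        sum_ite_eq_range m (g x) (hg x) F]
    ring


lemma counter_eq_bump (n : Int) (hn : 0 < n) (l : List Int) (s : List Int) :
    l.foldl (fun s x => PySem.List.pySetD s (PySem.Int.mod x n)
        (PySem.List.pyGetD s (PySem.Int.mod x n) 0 + 1)) s
      = l.foldl (fun s x => s.set (PySem.Int.mod x n).toNat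
          (s.getD (PySem.Int.mod x n).toNat 0 + 1)) s := by
  apply PySem.List.foldl_congr_mem
  intro acc x _
  rw [PySem.List.pySetD_of_nonneg acc _ (PySem.Int.mod_nonneg x hn),
      PySem.List.pyGetD_of_nonneg acc _ (PySem.Int.mod_nonneg x hn)]

lemma getD_replicate_zero (m k : Nat) : (List.replicate m (0:Int)).getD k 0 = 0 := by
  rw [List.getD_eq_getElem?_getD, List.getElem?_replicate]
  split <;> simp

lemma mod_toNat_lt (n x : Int) (hn : 0 < n) : (PySem.Int.mod x n).toNat < n.toNat := by
  have h1 := PySem.Int.mod_nonneg x hn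
  have h2 := PySem.Int.mod_lt x hn
  omega

lemma counter_getD (n : Int) (hn : 0 < n) (l : List Int) (b : Nat) (hb : b < n.toNat) :
    (l.foldl (fun s x => PySem.List.pySetD s (PySem.Int.mod x n)
        (PySem.List.pyGetD s (PySem.Int.mod x n) 0 + 1))
      (PySem.List.pyRepeat [(0:Int)] n)).getD b 0 = cnt n l b := by
  rw [counter_eq_bump n hn, PySem.List.pyRepeat_singleton,
      getD_foldl_bump l _ _ b
        (fun x _ => by rw [List.length_replicate]; exact mod_toNat_lt n x hn)
        (by rwa [List.length_replicate]),
      getD_replicate_zero]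
  simp [cnt]

lemma length_foldl2_bump (P Q : List Int) (g : Int → Int → Nat) (s : List Int) :
    (P.foldl (fun s i => Q.foldl (fun s j => s.set (g i j) (s.getD (g i j) 0 + 1)) s) s).length
      = s.length := by
  induction P generalizing s with
  | nil => rfl
  | cons x P ih => rw [List.foldl_cons, ih, length_foldl_bump]

lemma sums0_getD (n : Int) (k : Nat) :
    ((PySem.List.pyRange 0 n).map (fun _ => (0:Int))).getD k 0 = 0 := by
  rw [List.getD_eq_getElem?_getD, List.getElem?_map]
  cases h : (PySem.List.pyRange 0 n)[k]? <;> simp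

lemma sums0_length (n : Int) :
    ((PySem.List.pyRange 0 n).map (fun _ => (0:Int))).length = n.toNat := by
  rw [List.length_map, PySem.List.length_pyRange_one]
  omega

lemma sub_emod_mod (n k i : Int) : (k - i) % n = (k - i % n) % n := by
  rw [Int.sub_emod k i, Int.sub_emod k (i % n), Int.emod_emod_of_dvd i dvd_rfl]

lemma SA_getD (n : Int) (hn : 0 < n) (p q : List Int) (k : Nat) (hk : k < n.toNat) :
    (p.foldl (fun s i => q.foldl (fun s j =>
        PySem.List.pySetD s (PySem.Int.mod (i+j) n)
          (PySem.List.pyGetD s (PySem.Int.mod (i+j) n) 0 + 1)) s)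
      ((PySem.List.pyRange 0 n).map (fun _ => (0:Int)))).getD k 0
    = ((List.range n.toNat).map (fun a =>
        cnt n p a * cnt n q ((PySem.Int.mod ((k:Int) - (a:Int)) n).toNat))).sum := by
  have hkn : (k:Int) < n := by omega
  have hk0 : (0:Int) ≤ k := by positivity
  -- rewrite the fold body to the Nat-indexed bump form
  have hcongr : ∀ (acc : List Int), ∀ i ∈ p,
      (fun s i => q.foldl (fun s j =>
        PySem.List.pySetD s (PySem.Int.mod (i+j) n)
          (PySem.List.pyGetD s (PySem.Int.mod (i+j) n) 0 + 1)) s) acc i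
      = (fun s i => q.foldl (fun s j => s.set ((PySem.Int.mod (i+j) n).toNat)
          (s.getD ((PySem.Int.mod (i+j) n).toNat) 0 + 1)) s) acc i := by
    intro acc i _
    exact PySem.List.foldl_congr_mem q _ _ acc (fun a j _ => by
      rw [PySem.List.pySetD_of_nonneg a _ (PySem.Int.mod_nonneg _ hn),
          PySem.List.pyGetD_of_nonneg a _ (PySem.Int.mod_nonneg _ hn)])
  rw [PySem.List.foldl_congr_mem p _ _ _ hcongr,
      getD_foldl2_bump p q (fun i j => (PySem.Int.mod (i+j) n).toNat) _ k
        (fun i j => by rw [sums0_length]; exact mod_toNat_lt n _ hn)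
        (by rwa [sums0_length]),
      sums0_getD, zero_add]
  -- each p-term counts q-elements by their residue
  have hterm : ∀ i ∈ p,
      ((q.countP (fun j => (PySem.Int.mod (i+j) n).toNat == k) : Nat) : Int)
        = (fun a => cnt n q ((PySem.Int.mod ((k:Int) - (a:Int)) n).toNat))
            ((PySem.Int.mod i n).toNat) := by
    intro i _
    have hcount : q.countP (fun j => (PySem.Int.mod (i+j) n).toNat == k)
        = q.countP (fun j => (PySem.Int.mod j n).toNat
            == (PySem.Int.mod ((k:Int) - (((PySem.Int.mod i n).toNat : Nat):Int)) n).toNat) := by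
      apply List.countP_congr
      intro j _
      have e0 : (((PySem.Int.mod i n).toNat : Nat) : Int) = i % n := by
        rw [Int.toNat_of_nonneg (PySem.Int.mod_nonneg i hn), PySem.Int.mod_eq_emod_of_pos hn]
      have hiff : ((PySem.Int.mod (i+j) n).toNat = k) ↔
          ((PySem.Int.mod j n).toNat
            = (PySem.Int.mod ((k:Int) - (((PySem.Int.mod i n).toNat : Nat):Int)) n).toNat) := by
        rw [PySem.Int.mod_eq_emod_of_pos hn, PySem.Int.mod_eq_emod_of_pos hn, e0,
            PySem.Int.mod_eq_emod_of_pos hn, ← sub_emod_mod n (k:Int) i]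
        have h1 : 0 ≤ (i+j) % n := Int.emod_nonneg _ (by omega)
        have h2 : 0 ≤ j % n := Int.emod_nonneg _ (by omega)
        have h3 : 0 ≤ ((k:Int) - i) % n := Int.emod_nonneg _ (by omega)
        constructor
        · intro h
          have hij : (i+j) % n = (k:Int) := by
            generalize hX : (i+j) % n = X at h h1
            omega
          rw [(shift_iff n hn (k:Int) i j hk0 hkn).mp hij]
        · intro h
          have hj : j % n = ((k:Int) - i) % n := by
            generalize hX : j % n = X at h h2
            generalize hY : ((k:Int) - i) % n = Y at h h3
            omega
          rw [(shift_iff n hn (k:Int) i j hk0 hkn).mpr hj]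
          simp
      by_cases hA : (PySem.Int.mod (i+j) n).toNat = k
      · simp [hA, hiff.mp hA]
      · have h1 : ((PySem.Int.mod (i+j) n).toNat == k) = false :=
          beq_eq_false_iff_ne.mpr hA
        have h2 := beq_eq_false_iff_ne.mpr (fun hbd => hA (hiff.mpr hbd))
        rw [h1, h2]
    rw [hcount]
    rfl
  rw [List.map_congr_left hterm,
      class_sum (fun i => (PySem.Int.mod i n).toNat) n.toNat
        (fun x => mod_toNat_lt n x hn) p
        (fun a => cnt n q ((PySem.Int.mod ((k:Int) - (a:Int)) n).toNat))]
  rfl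

lemma SB_inner (n : Int) (hn : 0 < n) (p q : List Int) (r : Int) :
    ((PySem.List.pyRange 0 n).map (fun a =>
        PySem.List.pyGetD (p.foldl (fun s x => PySem.List.pySetD s (PySem.Int.mod x n)
            (PySem.List.pyGetD s (PySem.Int.mod x n) 0 + 1)) (PySem.List.pyRepeat [(0:Int)] n)) a 0
      * PySem.List.pyGetD (q.foldl (fun s x => PySem.List.pySetD s (PySem.Int.mod x n)
            (PySem.List.pyGetD s (PySem.Int.mod x n) 0 + 1)) (PySem.List.pyRepeat [(0:Int)] n))
          (PySem.Int.mod (r - a) n) 0)).sum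
    = ((List.range n.toNat).map (fun a =>
        cnt n p a * cnt n q ((PySem.Int.mod (r - (a:Int)) n).toNat))).sum := by
  rw [PySem.List.pyRange_zero, List.map_map]
  apply congrArg List.sum
  apply List.map_congr_left
  intro a ha
  rw [List.mem_range] at ha
  simp only [Function.comp]
  rw [PySem.List.pyGetD_natCast, counter_getD n hn p a ha,
      PySem.List.pyGetD_of_nonneg _ _ (PySem.Int.mod_nonneg _ hn),
      counter_getD n hn q _ (mod_toNat_lt n _ hn)]

lemma SA_length (n : Int) (hn : 0 < n) (p q : List Int) :
    (p.foldl (fun s i => q.foldl (fun s j =>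
        PySem.List.pySetD s (PySem.Int.mod (i+j) n)
          (PySem.List.pyGetD s (PySem.Int.mod (i+j) n) 0 + 1)) s)
      ((PySem.List.pyRange 0 n).map (fun _ => (0:Int)))).length = n.toNat := by
  have hcongr : ∀ (acc : List Int), ∀ i ∈ p,
      (fun s i => q.foldl (fun s j =>
        PySem.List.pySetD s (PySem.Int.mod (i+j) n)
          (PySem.List.pyGetD s (PySem.Int.mod (i+j) n) 0 + 1)) s) acc i
      = (fun s i => q.foldl (fun s j => s.set ((PySem.Int.mod (i+j) n).toNat)
          (s.getD ((PySem.Int.mod (i+j) n).toNat) 0 + 1)) s) acc i := by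
    intro acc i _
    exact PySem.List.foldl_congr_mem q _ _ acc (fun a j _ => by
      rw [PySem.List.pySetD_of_nonneg a _ (PySem.Int.mod_nonneg _ hn),
          PySem.List.pyGetD_of_nonneg a _ (PySem.Int.mod_nonneg _ hn)])
  rw [PySem.List.foldl_congr_mem p _ _ _ hcongr, length_foldl2_bump, sums0_length]

lemma S_eq (n : Int) (hn : 0 < n) (p q : List Int) :
    p.foldl (fun s i => q.foldl (fun s j =>
        PySem.List.pySetD s (PySem.Int.mod (i+j) n)
          (PySem.List.pyGetD s (PySem.Int.mod (i+j) n) 0 + 1)) s)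
      ((PySem.List.pyRange 0 n).map (fun _ => (0:Int)))
    = (PySem.List.pyRange 0 n).map (fun r =>
        ((PySem.List.pyRange 0 n).map (fun a =>
          PySem.List.pyGetD (p.foldl (fun s x => PySem.List.pySetD s (PySem.Int.mod x n)
              (PySem.List.pyGetD s (PySem.Int.mod x n) 0 + 1)) (PySem.List.pyRepeat [(0:Int)] n)) a 0
        * PySem.List.pyGetD (q.foldl (fun s x => PySem.List.pySetD s (PySem.Int.mod x n)
              (PySem.List.pyGetD s (PySem.Int.mod x n) 0 + 1)) (PySem.List.pyRepeat [(0:Int)] n))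
            (PySem.Int.mod (r - a) n) 0)).sum) := by
  apply List.ext_getElem
  · rw [SA_length n hn p q, List.length_map, PySem.List.length_pyRange_one]
    omega
  · intro k h1 h2
    have hk : k < n.toNat := by rwa [SA_length n hn p q] at h1
    rw [← List.getD_eq_getElem _ 0 h1, SA_getD n hn p q k hk, List.getElem_map,
        PySem.List.getElem_pyRange_one, zero_add, SB_inner n hn p q (k:Int)]

lemma le_getLast_of_pairwise (L : List Int) (hp : L.Pairwise (· < ·)) (h : L ≠ []) :
    ∀ x ∈ L, x ≤ L.getLast h := by
  induction L with
  | nil => simp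
  | cons a L ih =>
    intro x hx
    cases L with
    | nil => simp at hx; simp [hx]
    | cons b M =>
      rw [List.getLast_cons (by simp)]
      rcases List.mem_cons.mp hx with rfl | hx'
      · have hlt : ∀ y ∈ b :: M, x < y := (List.pairwise_cons.mp hp).1
        exact le_of_lt (hlt _ (List.getLast_mem _))
      · exact ih (List.pairwise_cons.mp hp).2 (by simp) x hx'


lemma inner_single (n i : Int) (_hn : 0 < n) (h0 : 0 ≤ i) (hi : i < n) :
    List.filter (fun j => PySem.Int.mod (j+i) n == 0) (PySem.List.pyRange 1 (n+1))
      = [n - i] := by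
  rw [PySem.List.pyRange_one_append 1 (n-i) (n+1) (by omega) (by omega),
      PySem.List.pyRange_one_append (n-i) (n-i+1) (n+1) (by omega) (by omega),
      show PySem.List.pyRange (n-i) (n-i+1) = [n-i] from PySem.List.pyRange_one_singleton (n-i),
      List.filter_append, List.filter_append]
  have hleft : List.filter (fun j => PySem.Int.mod (j+i) n == 0) (PySem.List.pyRange 1 (n-i)) = [] := by
    rw [List.filter_eq_nil_iff]
    intro j hj
    rw [PySem.List.mem_pyRange_one] at hj
    simp only [beq_iff_eq, PySem.Int.mod_eq_zero_iff_dvd]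
    intro hdvd
    have := Int.le_of_dvd (by omega) hdvd
    omega
  have hright : List.filter (fun j => PySem.Int.mod (j+i) n == 0) (PySem.List.pyRange (n-i+1) (n+1)) = [] := by
    rw [List.filter_eq_nil_iff]
    intro j hj
    rw [PySem.List.mem_pyRange_one] at hj
    simp only [beq_iff_eq, PySem.Int.mod_eq_zero_iff_dvd]
    intro hdvd
    have hdvd2 : n ∣ (j + i - n) := dvd_sub hdvd dvd_rfl
    have := Int.le_of_dvd (by omega) hdvd2
    omega
  have hmid : List.filter (fun j => PySem.Int.mod (j+i) n == 0) [n-i] = [n-i] := by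
    have harg : n - i + i = n := by ring
    have hz : PySem.Int.mod n n = 0 :=
      (PySem.Int.mod_eq_zero_iff_dvd n n).mpr dvd_rfl
    simp [List.filter, harg, hz]
  rw [hleft, hright, hmid, List.nil_append, List.append_nil]

def scanb (Sg : Int → Int) (m : Int) : Int :=
  (PySem.List.pyRange 1 m).foldl (fun b r => if Sg r ≤ Sg b then r else b) 0

lemma scan_inv (Sg : Int → Int) (t : Nat) :
    0 ≤ scanb Sg (1 + (t:Int)) ∧ scanb Sg (1 + (t:Int)) < 1 + (t:Int)
    ∧ (∀ x : Int, 0 ≤ x → x < 1 + (t:Int) → Sg (scanb Sg (1 + (t:Int))) ≤ Sg x)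
    ∧ (∀ x : Int, scanb Sg (1 + (t:Int)) < x → x < 1 + (t:Int) → Sg (scanb Sg (1 + (t:Int))) < Sg x) := by
  induction t with
  | zero =>
    have h0 : scanb Sg (1 + ((0:Nat):Int)) = 0 := by
      have h1 : (1 + ((0:Nat):Int)) = 1 := by norm_num
      rw [h1]
      unfold scanb
      rw [PySem.List.pyRange_one_eq_nil (by omega)]
      rfl
    rw [h0]
    refine ⟨le_refl 0, by omega, ?_, ?_⟩
    · intro x hx0 hx1
      have : x = 0 := by omega
      rw [this]
    · intro x hx0 hx1
      omega
  | succ t ih =>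
    obtain ⟨h0, h1, hmin, hstrict⟩ := ih
    have hsplit : (1 + ((t+1:Nat)):Int) = (1 + (t:Int)) + 1 := by push_cast; ring
    have hsame : scanb Sg (1 + ((t+1:Nat)):Int)
        = if Sg (1 + (t:Int)) ≤ Sg (scanb Sg (1 + (t:Int))) then (1 + (t:Int))
          else scanb Sg (1 + (t:Int)) := by
      unfold scanb
      rw [hsplit, PySem.List.pyRange_one_succ_right (by omega), List.foldl_append]
      simp
    rw [hsame]
    by_cases hc : Sg (1 + (t:Int)) ≤ Sg (scanb Sg (1 + (t:Int)))
    · rw [if_pos hc]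
      push_cast
      refine ⟨by omega, by omega, ?_, ?_⟩
      · intro x hx0 hx1
        by_cases hx : x = 1 + (t:Int)
        · rw [hx]
        · exact le_trans hc (hmin x hx0 (by omega))
      · intro x hx0 hx1
        omega
    · rw [if_neg hc]
      push_cast
      refine ⟨h0, by omega, ?_, ?_⟩
      · intro x hx0 hx1
        by_cases hx : x = 1 + (t:Int)
        · rw [hx]; omega
        · exact hmin x hx0 (by omega)
      · intro x hx0 hx1
        by_cases hx : x = 1 + (t:Int)
        · rw [hx]; omega
        · exact hstrict x hx0 (by omega)

theorem main_eq (n : Int) (p q : List Int) (hn : 1 ≤ n) : solution n p q = solution_alt n p q := by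
  have hn0 : 0 < n := hn
  unfold solution solution_alt
  simp only []
  rw [S_eq n hn0 p q]
  generalize hS : (PySem.List.pyRange 0 n).map (fun r =>
        ((PySem.List.pyRange 0 n).map (fun a =>
          PySem.List.pyGetD (p.foldl (fun s x => PySem.List.pySetD s (PySem.Int.mod x n)
              (PySem.List.pyGetD s (PySem.Int.mod x n) 0 + 1)) (PySem.List.pyRepeat [(0:Int)] n)) a 0
        * PySem.List.pyGetD (q.foldl (fun s x => PySem.List.pySetD s (PySem.Int.mod x n)
              (PySem.List.pyGetD s (PySem.Int.mod x n) 0 + 1)) (PySem.List.pyRepeat [(0:Int)] n))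
            (PySem.Int.mod (r - a) n) 0)).sum) = S
  have hSlen : S.length = n.toNat := by
    rw [← hS, List.length_map, PySem.List.length_pyRange_one]
    omega
  -- the minimum of sums
  obtain ⟨m, hm⟩ : ∃ m, PySem.List.min? S (fun x => x) = some m := by
    cases hmm : PySem.List.min? S (fun x => x) with
    | none =>
      exfalso
      rw [PySem.List.min?_eq_none_iff] at hmm
      rw [hmm] at hSlen
      simp at hSlen
      omega
    | some v => exact ⟨v, rfl⟩
  rw [hm]
  simp only [Option.getD_some]
  have hm_mem : m ∈ S := PySem.List.min?_mem hm
  have hm_min : ∀ y ∈ S, m ≤ y := PySem.List.min?_isMin hm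
  have hSg_getD : ∀ x : Int, 0 ≤ x → x < n → PySem.List.pyGetD S x 0 ∈ S := by
    intro x hx0 hxn
    rw [PySem.List.pyGetD_of_nonneg S _ hx0]
    have hxlt : x.toNat < S.length := by omega
    rw [List.getD_eq_getElem _ _ hxlt]
    exact List.getElem_mem _
  -- the answer list of A is the filtered indices mapped through n - i
  rw [PySem.List.foldl_congr_mem (PySem.List.pyRange 0 n) _
        (fun acc i => if (PySem.List.pyGetD S i 0 == m) = true then acc ++ [n - i] else acc) []
        (by
          intro acc i hi
          rw [PySem.List.mem_pyRange_one] at hi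
          by_cases hP : (PySem.List.pyGetD S i 0 == m) = true
          · simp only [hP, if_true]
            rw [PySem.List.foldl_append_if_eq_filter (fun j => PySem.Int.mod (j + i) n == 0),
              inner_single n i hn0 hi.1 hi.2]
          · simp only [hP]
            simp),
      PySem.List.foldl_append_if (fun i => PySem.List.pyGetD S i 0 == m) (fun i => n - i),
      List.nil_append]
  -- L, its last element B
  set L := (PySem.List.pyRange 0 n).filter (fun i => PySem.List.pyGetD S i 0 == m) with hL
  have hLpair : L.Pairwise (· < ·) :=
    List.Pairwise.filter _ (PySem.List.pairwise_lt_pyRange_one 0 n)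
  obtain ⟨km, hkmlt, hSkm⟩ := List.getElem_of_mem hm_mem
  have hkmlt' : km < n.toNat := by omega
  have hkmL : (km:Int) ∈ L := by
    rw [hL, List.mem_filter]
    refine ⟨PySem.List.mem_pyRange_one.mpr ⟨by positivity, by omega⟩, ?_⟩
    rw [PySem.List.pyGetD_natCast, List.getD_eq_getElem _ _ hkmlt, hSkm]
    simp
  have hLne : L ≠ [] := List.ne_nil_of_mem hkmL
  have hLub := le_getLast_of_pairwise L hLpair hLne
  set B := L.getLast hLne with hB
  have hBmem : B ∈ L := List.getLast_mem hLne
  have hBfacts := List.mem_filter.mp (hL ▸ hBmem)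
  have hBrange := PySem.List.mem_pyRange_one.mp hBfacts.1
  have hSgB : PySem.List.pyGetD S B 0 = m := by
    have := hBfacts.2
    simpa using this
  -- the minimum of A's answer list
  have hans_min : PySem.List.min? (L.map (fun i => n - i)) (fun x => x) = some (n - B) := by
    cases hv : PySem.List.min? (L.map (fun i => n - i)) (fun x => x) with
    | none =>
      exfalso
      rw [PySem.List.min?_eq_none_iff] at hv
      exact hLne (List.map_eq_nil_iff.mp hv)
    | some v =>
      have hvmem := PySem.List.min?_mem hv
      have hvmin := PySem.List.min?_isMin hv
      obtain ⟨x, hxL, hxv⟩ := List.mem_map.mp hvmem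
      have h1 : n - B ≤ v := by
        have := hLub x hxL
        omega
      have h2 : v ≤ n - B := hvmin _ (List.mem_map_of_mem hBmem)
      rw [show v = n - B by omega]
  rw [hans_min]
  simp only [Option.getD_some]
  -- B's scan computes the same index
  have hscan : List.foldl (fun b r =>
      if PySem.List.pyGetD S r 0 ≤ PySem.List.pyGetD S b 0 then r else b) 0
        (PySem.List.pyRange 1 n)
      = scanb (fun x => PySem.List.pyGetD S x 0) n := rfl
  rw [hscan]
  have hn1 : 1 + (((n-1).toNat : Nat) : Int) = n := by omega
  obtain ⟨hb0, hb1, hbmin, hbstrict⟩ := scan_inv (fun x => PySem.List.pyGetD S x 0) (n-1).toNat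
  rw [hn1] at hb0 hb1 hbmin hbstrict
  set b := scanb (fun x => PySem.List.pyGetD S x 0) n with hbdef
  have hSgb : PySem.List.pyGetD S b 0 = m := by
    refine le_antisymm ?_ (hm_min _ (hSg_getD b hb0 hb1))
    have := hbmin B hBrange.1 hBrange.2
    simp only [] at this
    rw [hSgB] at this
    exact this
  have hbL : b ∈ L := by
    rw [hL, List.mem_filter]
    refine ⟨PySem.List.mem_pyRange_one.mpr ⟨hb0, hb1⟩, ?_⟩
    rw [hSgb]
    simp
  have hble : b ≤ B := hLub b hbL
  rcases eq_or_lt_of_le hble with heq | hlt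
  · rw [heq]
  · exfalso
    have := hbstrict B hlt hBrange.2
    simp only [] at this
    rw [hSgB, hSgb] at this
    exact lt_irrefl m this

-- ===== VERDICT (by name: the statement is the Claim_ definition above) =====
theorem solution_spec : Claim_equal_solution := by
  intro n p q _ hpre
  unfold Spec_solution
  exact main_eq n p q hpre
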